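-- pv_equiv track=rewrite | github.com/petemeng/MAGeCK-Tutorial | MAGeCK/wechat_drafts/build_wechat_drafts.py | extract_leading_quote_blocks
-- ===== SOURCE A (Python) =====
-- def extract_leading_quote_blocks(md_text: str) -> list[list[str]]:
--     blocks: list[list[str]] = []
--     current: list[str] = []
--     seen_quote = False
--     for line in md_text.splitlines():
--         stripped = line.rstrip()
--         if stripped.startswith('>'):
--             seen_quote = True
--             current.append(stripped.lstrip('>').strip())
--             continue
--         if current:
--             blocks.append(current)
--             current = []
--         if seen_quote and stripped.strip() and not stripped.startswith('#'):
--             break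
--     if current:
--         blocks.append(current)
--     return [block for block in blocks if any(item.strip() for item in block)]
-- ===== SOURCE B (Python) =====
-- def extract_leading_quote_blocks(md_text: str) -> list[list[str]]:
--     # Pass 1: take the leading region -- all lines before the first line that,
--     # after rstrip, is non-empty, is not a quote ('>') or heading ('#') line,
--     # and comes after at least one quote line.
--     prefix = []
--     seen = False
--     for line in md_text.splitlines():
--         s = line.rstrip()
--         if s.startswith('>'):
--             seen = True
--         elif seen and s.strip() and not s.startswith('#'):
--             break
--         prefix.append(line)
--     # Pass 2: group the prefix into runs of quote lines, cleaning each line and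
--     # keeping only runs that contain some real content.
--     blocks = []
--     run = []
--     for line in prefix:
--         s = line.rstrip()
--         if s.startswith('>'):
--             run.append(s.lstrip('>').strip())
--         elif run:
--             if any(x.strip() for x in run):
--                 blocks.append(run)
--             run = []
--     if run and any(x.strip() for x in run):
--         blocks.append(run)
--     return blocks
-- ===== Notes on version B (the rewrite author's own statement) =====
-- stated objective: simpler
-- what changed: Replaces A's single interleaved loop carrying blocks/current/seen_quote state plus a trailing filter comprehension by two independent passes: one that cuts off the leading region at the first breaking line, and one that groups that prefix into quote runs, emitting each run only if it has real content.
import Mathlib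
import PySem

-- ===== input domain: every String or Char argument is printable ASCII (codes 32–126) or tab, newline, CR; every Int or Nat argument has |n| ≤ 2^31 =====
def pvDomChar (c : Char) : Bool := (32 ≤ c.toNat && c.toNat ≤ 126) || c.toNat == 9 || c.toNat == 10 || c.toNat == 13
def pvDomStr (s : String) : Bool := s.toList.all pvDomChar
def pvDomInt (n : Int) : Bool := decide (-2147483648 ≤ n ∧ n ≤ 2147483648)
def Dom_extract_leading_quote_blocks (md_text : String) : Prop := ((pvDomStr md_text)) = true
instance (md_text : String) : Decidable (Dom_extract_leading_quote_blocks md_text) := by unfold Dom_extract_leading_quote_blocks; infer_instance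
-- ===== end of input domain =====

-- B replaces A's single interleaved loop (blocks/current/seen_quote state plus a final
-- filter comprehension) by two passes: first cut off the leading region, then group it
-- into quote runs, filtering each run as it is emitted (objective: simpler decomposition).

-- hand port of str.lstrip('>') (PySem has no one-sided stripChars): drops all leading
-- '>' code points, exact for this single-character strip set
def pvLstripGt (cs : List Char) : List Char := cs.dropWhile (· == '>')

-- ===== PORT A =====
def pvLoopA : List String → List (List String) → List String → Bool → List (List String)
  | [], blocks, current, _ =>
      blocks ++ (if current.isEmpty then [] else [current])
  | line :: rest, blocks, current, seen =>
      let stripped := PySem.Str.rstrip line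
      if PySem.Str.startswith stripped ">" then
        pvLoopA rest blocks
          (current ++ [PySem.Str.strip (String.ofList (pvLstripGt stripped.toList))]) true
      else
        let blocks' := if current.isEmpty then blocks else blocks ++ [current]
        if seen && (PySem.Str.strip stripped != "") && !(PySem.Str.startswith stripped "#") then
          blocks'
        else
          pvLoopA rest blocks' [] seen

def extract_leading_quote_blocks (md_text : String) : List (List String) :=
  (pvLoopA (PySem.Str.splitlines md_text) [] [] false).filter
    (fun block => block.any (fun item => PySem.Str.strip item != ""))

-- ===== PORT B =====
-- pass 1 of Source B: the lines before the first breaking line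
def pvPrefixB : List String → Bool → List String
  | [], _ => []
  | line :: rest, seen =>
      let s := PySem.Str.rstrip line
      if PySem.Str.startswith s ">" then line :: pvPrefixB rest true
      else if seen && (PySem.Str.strip s != "") && !(PySem.Str.startswith s "#") then []
      else line :: pvPrefixB rest seen

def pvKeep (run : List String) : Bool := run.any (fun x => PySem.Str.strip x != "")

-- pass 2 of Source B: group into quote runs, emitting each kept run directly
def pvGroupB : List String → List String → List (List String)
  | [], run => if !run.isEmpty && pvKeep run then [run] else []
  | line :: rest, run =>
      let s := PySem.Str.rstrip line
      if PySem.Str.startswith s ">" then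
        pvGroupB rest (run ++ [PySem.Str.strip (String.ofList (pvLstripGt s.toList))])
      else if run.isEmpty then
        pvGroupB rest []
      else
        (if pvKeep run then [run] else []) ++ pvGroupB rest []

def extract_leading_quote_blocks_alt (md_text : String) : List (List String) :=
  pvGroupB (pvPrefixB (PySem.Str.splitlines md_text) false) []

-- ===== PRECONDITION & SPEC =====
def Spec_extract_leading_quote_blocks (md_text : String) (out : List (List String)) : Prop := out = extract_leading_quote_blocks_alt md_text
instance (md_text : String) (out : List (List String)) : Decidable (Spec_extract_leading_quote_blocks md_text out) := by unfold Spec_extract_leading_quote_blocks; infer_instance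

-- ===== CLAIM (what is proved, stated in full; the proofs are below) =====
def Claim_equal_extract_leading_quote_blocks : Prop := ∀ (md_text : String), Dom_extract_leading_quote_blocks md_text → Spec_extract_leading_quote_blocks md_text (extract_leading_quote_blocks md_text)

-- ===== LEMMAS AND PROOFS =====

theorem pvGroupB_cons (line : String) (rest : List String) (run : List String) :
    pvGroupB (line :: rest) run =
      (if PySem.Str.startswith (PySem.Str.rstrip line) ">" then
        pvGroupB rest (run ++ [PySem.Str.strip (String.ofList (pvLstripGt (PySem.Str.rstrip line).toList))])
      else if run.isEmpty then pvGroupB rest []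
      else (if pvKeep run then [run] else []) ++ pvGroupB rest []) := rfl

theorem pvLoopA_filter (ls : List String) :
    ∀ (blocks : List (List String)) (current : List String) (seen : Bool),
    (pvLoopA ls blocks current seen).filter pvKeep
      = blocks.filter pvKeep ++ pvGroupB (pvPrefixB ls seen) current := by
  induction ls with
  | nil =>
      intro blocks current seen
      by_cases h : current.isEmpty <;>
        simp [pvLoopA, pvPrefixB, pvGroupB, h, List.filter_append] <;>
        by_cases hk : pvKeep current <;> simp [hk]
  | cons line rest ih =>
      intro blocks current seen
      show List.filter pvKeep
          (if PySem.Str.startswith (PySem.Str.rstrip line) ">" then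
            pvLoopA rest blocks
              (current ++ [PySem.Str.strip (String.ofList (pvLstripGt (PySem.Str.rstrip line).toList))]) true
          else if seen && (PySem.Str.strip (PySem.Str.rstrip line) != "")
              && !(PySem.Str.startswith (PySem.Str.rstrip line) "#") then
            (if current.isEmpty then blocks else blocks ++ [current])
          else pvLoopA rest (if current.isEmpty then blocks else blocks ++ [current]) [] seen)
        = List.filter pvKeep blocks ++
          pvGroupB
            (if PySem.Str.startswith (PySem.Str.rstrip line) ">" then line :: pvPrefixB rest true
            else if seen && (PySem.Str.strip (PySem.Str.rstrip line) != "")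
                && !(PySem.Str.startswith (PySem.Str.rstrip line) "#") then []
            else line :: pvPrefixB rest seen)
            current
      by_cases hq : PySem.Str.startswith (PySem.Str.rstrip line) ">" = true
      · rw [if_pos hq, if_pos hq, pvGroupB_cons, if_pos hq, ih]
      · rw [if_neg hq, if_neg hq]
        by_cases hb : (seen && (PySem.Str.strip (PySem.Str.rstrip line) != "")
            && !(PySem.Str.startswith (PySem.Str.rstrip line) "#")) = true
        · rw [if_pos hb, if_pos hb]
          by_cases h : current.isEmpty <;>
            simp [pvGroupB, h, List.filter_append] <;>
            by_cases hk : pvKeep current <;> simp [hk]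
        · rw [if_neg hb, if_neg hb, pvGroupB_cons, if_neg hq, ih]
          by_cases h : current.isEmpty <;>
            simp [pvGroupB, h, List.filter_append] <;>
            by_cases hk : pvKeep current <;> simp [hk]

-- ===== VERDICT (by name: the statement is the Claim_ definition above) =====
theorem extract_leading_quote_blocks_spec : Claim_equal_extract_leading_quote_blocks := by
  intro md_text _
  unfold Spec_extract_leading_quote_blocks extract_leading_quote_blocks
    extract_leading_quote_blocks_alt
  have h := pvLoopA_filter (PySem.Str.splitlines md_text) [] [] false
  simpa [pvKeep] using h
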